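-- pv_equiv track=rewrite | github.com/larynx95/rosalind | src/ba06/ba06i_graph_to_genome/ba06i_01.py | graph_to_genome
-- ===== SOURCE A (Python) =====
-- def cycle_to_chromosome(nodes):
--     """
--     [int] -> [str]
--     return a list of strings (signed integers)
--     >>> cycle_to_chromosome([1,2,4,3,6,5,7,8])
--         (+1 -2 -3 +4)
--     """
--     chromosome = []
--     for j in range(0, len(nodes) // 2):
--         if nodes[2*j] < nodes[2*j + 1]:
--             chromosome.append('+' + str(nodes[2*j + 1] // 2))
--         else:
--             chromosome.append('-' + str(nodes[2*j] // 2))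
--     return chromosome
--
-- def graph_to_genome(colored_edges):
--     """
--     [(int,int)] -> [str]
--     implementation of 'GraphToGeneome' function
--     (Caution) This function is not always correct! TODO: Fix this!
--     >>> graph_to_genome([(2,4),(3,6),(5,1),(7,9),(10,12),(11,8)])
--         [['+1','-2','-3'],['-4','+5','-6']]
--     >>> graph_to_genome([(2,4),(3,8),(7,5),(6,1)])  # (+1 -2 -4 +3)
--         [['+1','-2','-4'],['+3']]    # <-- incorrect! TODO: Fix this!
--     """
--     colored_edges = sorted(colored_edges)  # <-- Is this right?
--     cycles = []
--     temp = []
--     for edge in colored_edges: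
--         temp.append(edge[0])
--         if edge[0] > edge[1]:
--             temp = [edge[1]] + temp
--             cycles.append(temp)
--             temp = []
--         else:
--             temp.append(edge[1])
--     chromosomes = []
--     for cycle in cycles:
--         chromosomes.append(cycle_to_chromosome(cycle))
--     return chromosomes
-- ===== SOURCE B (Python) =====
-- def graph_to_genome(colored_edges):
--     """Recursive decomposition: repeatedly split off the first chromosome
--     (everything up to and including the first 'closing' edge with a > b) and
--     emit its signed blocks by zipping rotated edge endpoints; no mutable
--     accumulator state, no node-cycle lists, no cycle_to_chromosome helper."""
--
--     def split_first(edges):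
--         # ((edges up to and incl. first closing edge), remaining edges), or None
--         if not edges:
--             return None
--         (a, b), rest = edges[0], edges[1:]
--         if a > b:
--             return [(a, b)], rest
--         r = split_first(rest)
--         if r is None:
--             return None
--         chunk, rem = r
--         return [(a, b)] + chunk, rem
--
--     def emit(chunk):
--         tails = [chunk[-1][1]] + [y for _, y in chunk[:-1]]
--         heads = [x for x, _ in chunk]
--         return ['+' + str(x // 2) if t < x else '-' + str(t // 2)
--                 for t, x in zip(tails, heads)]
--
--     def go(edges):
--         r = split_first(edges)
--         if r is None:
--             return []
--         chunk, rest = r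
--         return [emit(chunk)] + go(rest)
--
--     return go(sorted(colored_edges))
-- ===== Notes on version B (the rewrite author's own statement) =====
-- stated objective: alternative
-- what changed: B replaces A's stateful accumulator pass and node-cycle intermediate lists by structural recursion: split_first recursively peels off the first chromosome's edges up to the first closing edge, and emit produces the signed blocks by zipping rotated edge endpoints; cycle_to_chromosome and the index-over-range loop disappear.
import Mathlib
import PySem

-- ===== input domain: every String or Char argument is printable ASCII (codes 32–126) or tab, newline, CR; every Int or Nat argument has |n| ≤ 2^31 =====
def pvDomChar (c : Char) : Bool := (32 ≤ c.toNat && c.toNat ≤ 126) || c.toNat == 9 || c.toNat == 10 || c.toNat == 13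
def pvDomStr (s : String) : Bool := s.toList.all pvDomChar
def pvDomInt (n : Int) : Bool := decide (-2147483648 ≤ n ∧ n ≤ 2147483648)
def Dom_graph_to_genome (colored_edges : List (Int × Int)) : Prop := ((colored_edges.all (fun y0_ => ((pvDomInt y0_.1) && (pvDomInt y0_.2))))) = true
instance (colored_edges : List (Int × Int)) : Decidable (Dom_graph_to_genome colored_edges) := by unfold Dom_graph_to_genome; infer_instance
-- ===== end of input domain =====

-- One honest line: B recursively peels off one chromosome at a time (split_first) and emits
-- its signed blocks by zipping rotated edge endpoints, instead of A's stateful accumulator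
-- pass over node-cycle lists (objective: alternative).

-- ===== PORT A =====
-- nodes[2*j] / nodes[2*j+1]: since j < len(nodes)//2 both indices are in range, so
-- List.getD is exact here (Python never raises in this loop).
def cycle_to_chromosome (nodes : List Int) : List String :=
  (List.range (nodes.length / 2)).foldl (fun chromosome j =>
    if nodes.getD (2 * j) 0 < nodes.getD (2 * j + 1) 0 then
      chromosome ++ ["+" ++ PySem.Int.toStr (PySem.Int.floordiv (nodes.getD (2 * j + 1) 0) 2)]
    else
      chromosome ++ ["-" ++ PySem.Int.toStr (PySem.Int.floordiv (nodes.getD (2 * j) 0) 2)]) []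

def graph_to_genome (colored_edges : List (Int × Int)) : List (List String) :=
  let sortedEdges := PySem.List.sorted2 colored_edges (fun e => e.1) (fun e => e.2) false
  let st := sortedEdges.foldl (fun (st : List (List Int) × List Int) edge =>
    let temp := st.2 ++ [edge.1]
    if edge.1 > edge.2 then (st.1 ++ [edge.2 :: temp], [])
    else (st.1, temp ++ [edge.2])) ([], [])
  st.1.foldl (fun chromosomes cycle => chromosomes ++ [cycle_to_chromosome cycle]) []

-- ===== PORT B =====
-- Source B's split_first: edges up to and including the first closing edge, plus the rest
def pvSplitFirst : List (Int × Int) → Option (List (Int × Int) × List (Int × Int))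
  | [] => none
  | (a, b) :: rest =>
    if a > b then some ([(a, b)], rest)
    else
      match pvSplitFirst rest with
      | none => none
      | some (chunk, rem) => some ((a, b) :: chunk, rem)

-- Source B's emit: chunk is always nonempty here (split_first returns a chunk ending in its
-- closing edge), so Python's chunk[-1] never raises and getLastD is exact.
def pvEmitChunk (chunk : List (Int × Int)) : List String :=
  let tails := (chunk.getLastD (0, 0)).2 :: (chunk.dropLast.map (fun e => e.2))
  let heads := chunk.map (fun e => e.1)
  (tails.zip heads).map (fun p =>
    if p.1 < p.2 then "+" ++ PySem.Int.toStr (PySem.Int.floordiv p.2 2)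
    else "-" ++ PySem.Int.toStr (PySem.Int.floordiv p.1 2))

theorem pvSplitFirst_rest_lt :
    ∀ (es chunk rest : List (Int × Int)), pvSplitFirst es = some (chunk, rest) →
      rest.length < es.length := by
  intro es
  induction es with
  | nil => intro c r h; simp [pvSplitFirst] at h
  | cons e tl ih =>
    intro c r h
    obtain ⟨a, b⟩ := e
    simp only [pvSplitFirst] at h
    split at h
    · simp only [Option.some.injEq, Prod.mk.injEq] at h
      rw [← h.2]
      simp
    · cases hs : pvSplitFirst tl with
      | none => rw [hs] at h; simp at h
      | some p =>
        rw [hs] at h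
        obtain ⟨c', r'⟩ := p
        simp only [Option.some.injEq, Prod.mk.injEq] at h
        have := ih c' r' hs
        rw [← h.2]
        simp only [List.length_cons]
        omega

def pvGo (edges : List (Int × Int)) : List (List String) :=
  match h : pvSplitFirst edges with
  | none => []
  | some (chunk, rest) => pvEmitChunk chunk :: pvGo rest
termination_by edges.length
decreasing_by exact pvSplitFirst_rest_lt _ _ _ h

def graph_to_genome_alt (colored_edges : List (Int × Int)) : List (List String) :=
  pvGo (PySem.List.sorted2 colored_edges (fun e => e.1) (fun e => e.2) false)

-- ===== PRECONDITION & SPEC =====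
def Spec_graph_to_genome (colored_edges : List (Int × Int)) (out : List (List String)) : Prop := out = graph_to_genome_alt colored_edges
instance (colored_edges : List (Int × Int)) (out : List (List String)) : Decidable (Spec_graph_to_genome colored_edges out) := by unfold Spec_graph_to_genome; infer_instance

-- ===== CLAIM (what is proved, stated in full; the proofs are below) =====
def Claim_equal_graph_to_genome : Prop := ∀ (colored_edges : List (Int × Int)), Dom_graph_to_genome colored_edges → Spec_graph_to_genome colored_edges (graph_to_genome colored_edges)

-- ===== LEMMAS AND PROOFS =====

-- the signed block A and B both produce from a (previous-tail, head) node pair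
def pvTok (p x : Int) : String :=
  if p < x then "+" ++ PySem.Int.toStr (PySem.Int.floordiv x 2)
  else "-" ++ PySem.Int.toStr (PySem.Int.floordiv p 2)

-- recursive characterisation of A's cycle_to_chromosome
def pvPairRec : List Int → List String
  | x :: y :: rest => pvTok x y :: pvPairRec rest
  | _ => []

-- the node list A's main loop builds from a buffer of already-seen open edges
def pvFlat (buf : List (Int × Int)) : List Int := buf.flatMap (fun e => [e.1, e.2])

-- the cycles A's main fold produces from a given buffer of node values
def pvCyclesOf : List Int → List (Int × Int) → List (List Int)
  | _, [] => []
  | temp, (a, b) :: es =>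
    if a > b then (b :: (temp ++ [a])) :: pvCyclesOf [] es
    else pvCyclesOf (temp ++ [a] ++ [b]) es

theorem cycle_map (nodes : List Int) :
    cycle_to_chromosome nodes
      = (List.range (nodes.length / 2)).map
          (fun j => pvTok (nodes.getD (2 * j) 0) (nodes.getD (2 * j + 1) 0)) := by
  unfold cycle_to_chromosome
  have hfun : (fun (chromosome : List String) (j : Nat) =>
      if nodes.getD (2 * j) 0 < nodes.getD (2 * j + 1) 0 then
        chromosome ++ ["+" ++ PySem.Int.toStr (PySem.Int.floordiv (nodes.getD (2 * j + 1) 0) 2)]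
      else
        chromosome ++ ["-" ++ PySem.Int.toStr (PySem.Int.floordiv (nodes.getD (2 * j) 0) 2)])
      = fun chromosome j => chromosome ++ [pvTok (nodes.getD (2 * j) 0) (nodes.getD (2 * j + 1) 0)] := by
    funext c j
    unfold pvTok
    rw [apply_ite (fun s : String => c ++ [s])]
  rw [hfun, PySem.List.foldl_append_singleton_eq_map, List.nil_append]

theorem cycle_eq_pairRec (l : List Int) : cycle_to_chromosome l = pvPairRec l := by
  induction l using pvPairRec.induct with
  | case1 x y rest ih =>
    rw [cycle_map] at ih ⊢
    have hlen : (x :: y :: rest).length / 2 = rest.length / 2 + 1 := by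
      simp only [List.length_cons]
      omega
    rw [hlen, List.range_succ_eq_map, List.map_cons, List.map_map]
    unfold pvPairRec
    rw [← ih]
    congr 1
  | case2 l h =>
    match l, h with
    | [], _ => simp [cycle_map, pvPairRec]
    | [x], _ => simp [cycle_map, pvPairRec]
    | (x :: y :: rest), h => exact absurd rfl (h x y rest)

-- A's main fold, characterised by pvCyclesOf
theorem foldA_eq_cyclesOf (es : List (Int × Int)) :
    ∀ (cyc : List (List Int)) (temp : List Int),
    (es.foldl (fun (st : List (List Int) × List Int) edge =>
        let t := st.2 ++ [edge.1]
        if edge.1 > edge.2 then (st.1 ++ [edge.2 :: t], [])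
        else (st.1, t ++ [edge.2])) (cyc, temp)).1
    = cyc ++ pvCyclesOf temp es := by
  induction es with
  | nil => intro cyc temp; simp [pvCyclesOf]
  | cons e tl ih =>
    intro cyc temp
    obtain ⟨a, b⟩ := e
    simp only [List.foldl_cons, pvCyclesOf]
    by_cases hab : a > b
    · simp only [hab, if_true, ih]
      simp
    · simp only [hab, if_false, ih]

-- B's emit on a chunk with a generalized leading tail value
theorem pairRec_emit (a : Int) :
    ∀ (buf : List (Int × Int)) (t0 : Int),
    pvPairRec (t0 :: (pvFlat buf ++ [a]))
      = ((t0 :: buf.map (fun e => e.2)).zip (buf.map (fun e => e.1) ++ [a])).map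
          (fun p => pvTok p.1 p.2) := by
  intro buf
  induction buf with
  | nil => intro t0; simp [pvFlat, pvPairRec]
  | cons e tl ih =>
    intro t0
    obtain ⟨x, y⟩ := e
    have : pvFlat ((x, y) :: tl) = x :: y :: pvFlat tl := by simp [pvFlat]
    rw [this]
    simp only [List.cons_append, pvPairRec, List.map_cons, List.zip_cons_cons]
    rw [ih y]

theorem emit_eq_cycle (buf : List (Int × Int)) (a b : Int) :
    pvEmitChunk (buf ++ [(a, b)]) = pvPairRec (b :: (pvFlat buf ++ [a])) := by
  unfold pvEmitChunk
  rw [pairRec_emit a buf b]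
  simp only [pvTok, List.getLastD_concat, List.dropLast_concat, List.map_append, List.map_cons]
  simp

-- pvGo with the first chunk extended on the left by a buffer, versus A's cycles
theorem cycles_eq_go (es : List (Int × Int)) :
    ∀ (buf : List (Int × Int)),
    (pvCyclesOf (pvFlat buf) es).map cycle_to_chromosome
      = (match pvSplitFirst es with
         | none => []
         | some (chunk, rest) => pvEmitChunk (buf ++ chunk) :: pvGo rest) := by
  induction es with
  | nil => intro buf; simp [pvCyclesOf, pvSplitFirst]
  | cons e tl ih =>
    intro buf
    obtain ⟨a, b⟩ := e
    by_cases hab : a > b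
    · simp only [pvCyclesOf, pvSplitFirst, hab, if_true, List.map_cons]
      have h1 : cycle_to_chromosome (b :: (pvFlat buf ++ [a])) = pvEmitChunk (buf ++ [(a, b)]) := by
        rw [cycle_eq_pairRec]
        exact (emit_eq_cycle buf a b).symm
      have h2 : (pvCyclesOf (pvFlat ([] : List (Int × Int))) tl).map cycle_to_chromosome = pvGo tl := by
        rw [ih []]
        rw [pvGo]
        cases hs : pvSplitFirst tl with
        | none => simp
        | some p => obtain ⟨c, r⟩ := p; simp
      simp only [pvFlat, List.flatMap_nil] at h2
      rw [h1, h2]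
    · simp only [pvCyclesOf, pvSplitFirst, hab, if_false]
      have hf : pvFlat buf ++ [a] ++ [b] = pvFlat (buf ++ [(a, b)]) := by
        simp [pvFlat]
      rw [hf, ih (buf ++ [(a, b)])]
      cases pvSplitFirst tl with
      | none => simp
      | some p =>
        obtain ⟨c, r⟩ := p
        simp

-- ===== VERDICT (by name: the statement is the Claim_ definition above) =====
theorem graph_to_genome_spec : Claim_equal_graph_to_genome := by
  intro colored_edges _
  show _ = _
  unfold graph_to_genome graph_to_genome_alt
  rw [PySem.List.foldl_append_singleton_eq_map]
  simp only [foldA_eq_cyclesOf _ [] [], List.nil_append]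
  have h := cycles_eq_go (PySem.List.sorted2 colored_edges (fun e => e.1) (fun e => e.2) false) []
  simp only [pvFlat, List.flatMap_nil, List.nil_append] at h
  rw [h, pvGo]
  cases hs : pvSplitFirst (PySem.List.sorted2 colored_edges (fun e => e.1) (fun e => e.2) false) with
  | none => simp
  | some p => obtain ⟨c, r⟩ := p; simp
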